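-- pv_equiv track=rewrite | github.com/jonathanzhan1975/uni-admission-crawler | scripts/audit_sources.py | prioritize_routes
-- ===== SOURCE A (Python) =====
-- ROUTE_PRIORITY_MARKERS = (
--     "bkzs",
--     "admission",
--     "admissions",
--     "zsb",
--     "zs",
--     "news",
--     "jwc",
--     "yzb",
--     "gs",
-- )
--
-- def prioritize_routes(routes: list[str]) -> list[str]:
--     def score(route: str) -> tuple[int, str]:
--         lowered = route.lower()
--         for index, marker in enumerate(ROUTE_PRIORITY_MARKERS):
--             if marker in lowered:
--                 return (index, route)
--         return (len(ROUTE_PRIORITY_MARKERS), route)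
--     return sorted(routes, key=score)
-- ===== SOURCE B (Python) =====
-- ROUTE_PRIORITY_MARKERS = (
--     "bkzs",
--     "admission",
--     "admissions",
--     "zsb",
--     "zs",
--     "news",
--     "jwc",
--     "yzb",
--     "gs",
-- )
--
--
-- def prioritize_routes(routes: list[str]) -> list[str]:
--     def cls(route: str) -> int:
--         lowered = route.lower()
--         matches = [i for i, m in enumerate(ROUTE_PRIORITY_MARKERS) if m in lowered]
--         return matches[0] if matches else len(ROUTE_PRIORITY_MARKERS)
--
--     buckets = [[] for _ in range(len(ROUTE_PRIORITY_MARKERS) + 1)]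
--     for route in sorted(routes):
--         buckets[cls(route)].append(route)
--     return [r for bucket in buckets for r in bucket]
-- ===== Notes on version B (the rewrite author's own statement) =====
-- stated objective: alternative
-- what changed: Replaces the single composite-key (class, route) sort by two staged passes: one plain sort of the routes by string, then a bucket-distribution pass that appends each sorted route to the bucket of its priority class (class computed as the first index in a filtered enumeration of the markers) and concatenates the buckets in class order.
import Mathlib
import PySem

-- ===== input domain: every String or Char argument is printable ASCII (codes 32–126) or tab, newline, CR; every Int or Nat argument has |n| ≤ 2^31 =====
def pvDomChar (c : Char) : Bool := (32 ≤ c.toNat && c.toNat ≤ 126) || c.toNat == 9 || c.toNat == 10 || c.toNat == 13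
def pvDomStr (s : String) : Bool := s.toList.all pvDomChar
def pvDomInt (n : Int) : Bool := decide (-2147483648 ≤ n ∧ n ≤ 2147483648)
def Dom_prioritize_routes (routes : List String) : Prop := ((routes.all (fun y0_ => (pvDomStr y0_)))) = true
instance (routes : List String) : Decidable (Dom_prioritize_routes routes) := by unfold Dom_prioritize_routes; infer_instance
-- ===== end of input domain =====

-- B replaces A's single composite-key sort by two staged passes: one plain string sort, then a
-- bucket-distribution pass over the priority classes; alternative decomposition, same results.

def ROUTE_PRIORITY_MARKERS : List String :=
  ["bkzs", "admission", "admissions", "zsb", "zs", "news", "jwc", "yzb", "gs"]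

-- ===== PORT A =====
-- A's inner 'score' loop: scan the markers with their index, return (index, route) on the
-- first marker contained in the lowered route, else (len(markers), route).
def pvScoreGo (ms : List String) (i : Int) (lowered route : String) : Int × String :=
  match ms with
  | [] => (PySem.List.len ROUTE_PRIORITY_MARKERS, route)
  | m :: rest =>
      if PySem.Str.isIn m lowered then (i, route) else pvScoreGo rest (i + 1) lowered route

def pvScore (route : String) : Int × String :=
  pvScoreGo ROUTE_PRIORITY_MARKERS 0 (PySem.Str.lower route) route

def prioritize_routes (routes : List String) : List String :=
  PySem.List.sorted2 routes (fun r => (pvScore r).1) (fun r => (pvScore r).2)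

-- ===== PORT B =====
-- B's 'cls': the comprehension [i for i, m in enumerate(MARKERS) if m in lowered],
-- then its first element if any, else len(MARKERS).
def pvCls (route : String) : Int :=
  match ((PySem.List.enumerate ROUTE_PRIORITY_MARKERS).filter
      (fun p => PySem.Str.isIn p.2 (PySem.Str.lower route))).map (fun p => p.1) with
  | [] => PySem.List.len ROUTE_PRIORITY_MARKERS
  | i :: _ => i

-- B's body: buckets = [[] for _ in range(len+1)]; distribute sorted(routes); flatten.
def prioritize_routes_alt (routes : List String) : List String :=
  ((PySem.List.sorted routes (fun r => r)).foldl
      (fun bs route => bs.modify (pvCls route).toNat (fun b => b ++ [route]))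
      ((PySem.List.pyRange 0 (PySem.List.len ROUTE_PRIORITY_MARKERS + 1) 1).map
        (fun _ => ([] : List String)))).flatMap (fun bucket => bucket)

-- ===== PRECONDITION & SPEC =====
def Spec_prioritize_routes (routes : List String) (out : List String) : Prop := out = prioritize_routes_alt routes
instance (routes : List String) (out : List String) : Decidable (Spec_prioritize_routes routes out) := by unfold Spec_prioritize_routes; infer_instance

-- ===== CLAIM (what is proved, stated in full; the proofs are below) =====
def Claim_equal_prioritize_routes : Prop := ∀ (routes : List String), Dom_prioritize_routes routes → Spec_prioritize_routes routes (prioritize_routes routes)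

-- ===== LEMMAS AND PROOFS =====

-- A's score loop equals (first index of the filtered enumeration, else the sentinel, route).
theorem pvScoreGo_eq_filter (ms : List String) : ∀ (i : Int) (l r : String),
    pvScoreGo ms i l r =
      ((((PySem.List.enumerate ms i).filter (fun p => PySem.Str.isIn p.2 l)).map
          (fun p => p.1)).headD (PySem.List.len ROUTE_PRIORITY_MARKERS), r) := by
  induction ms with
  | nil => intro i l r; simp [pvScoreGo, PySem.List.enumerate_nil]
  | cons m rest ih =>
      intro i l r
      rw [PySem.List.enumerate_cons]
      simp only [pvScoreGo, List.filter_cons]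
      split <;> simp_all

-- A's score is (B's class, the route itself).
theorem pvScore_eq (r : String) : pvScore r = (pvCls r, r) := by
  unfold pvScore pvCls
  rw [pvScoreGo_eq_filter]
  cases (((PySem.List.enumerate ROUTE_PRIORITY_MARKERS).filter
      (fun p => PySem.Str.isIn p.2 (PySem.Str.lower r))).map (fun p => p.1)) with
  | nil => rfl
  | cons a t => rfl

theorem pvCls_bounds (r : String) : 0 ≤ pvCls r ∧ pvCls r ≤ 9 := by
  unfold pvCls
  split
  · constructor <;> decide
  · rename_i i t h
    have hi : i ∈ (((PySem.List.enumerate ROUTE_PRIORITY_MARKERS).filter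
        (fun p => PySem.Str.isIn p.2 (PySem.Str.lower r))).map (fun p => p.1)) := by
      rw [h]; exact List.mem_cons_self
    obtain ⟨p, hp, rfl⟩ := List.mem_map.mp hi
    have hi2 : p.1 ∈ (PySem.List.enumerate ROUTE_PRIORITY_MARKERS).map (fun q => q.1) :=
      List.mem_map_of_mem (List.mem_of_mem_filter hp)
    rw [PySem.List.map_fst_enumerate] at hi2
    have hb := PySem.List.mem_pyRange_one.mp hi2
    simp [ROUTE_PRIORITY_MARKERS] at hb
    omega

-- getD through List.modify (out-of-range j leaves the list unchanged).
theorem pv_getD_modify (bs : List (List String)) (j i : Nat) (f : List String → List String)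
    (hi : i < bs.length) :
    (bs.modify j f).getD i [] = if j = i then f (bs.getD i []) else bs.getD i [] := by
  simp only [List.getD_eq_getElem?_getD, List.getElem?_modify]
  rw [List.getElem?_eq_getElem hi]
  by_cases h : j = i <;> simp [h]

-- The distribution loop, read bucket by bucket.
theorem pv_fold_length (xs : List String) : ∀ (bs : List (List String)),
    (xs.foldl (fun bs route => bs.modify (pvCls route).toNat (fun b => b ++ [route])) bs).length
      = bs.length := by
  induction xs with
  | nil => intro bs; rfl
  | cons x xs ih => intro bs; rw [List.foldl_cons, ih, List.length_modify]

theorem pv_fold_getD (xs : List String) : ∀ (bs : List (List String)) (i : Nat), i < bs.length →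
    (xs.foldl (fun bs route => bs.modify (pvCls route).toNat (fun b => b ++ [route])) bs).getD i []
      = bs.getD i [] ++ xs.filter (fun r => (pvCls r).toNat == i) := by
  induction xs with
  | nil => intro bs i _; simp
  | cons x xs ih =>
      intro bs i hi
      rw [List.foldl_cons, ih _ i (by rw [List.length_modify]; exact hi),
        pv_getD_modify bs _ i _ hi, List.filter_cons]
      by_cases h : (pvCls x).toNat = i <;> simp [h]

-- B's output, in flatMap-over-classes form.
theorem pv_alt_eq (routes : List String) :
    prioritize_routes_alt routes
      = (List.range 10).flatMap (fun i =>
          (PySem.List.sorted routes (fun r => r)).filter (fun r => (pvCls r).toNat == i)) := by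
  unfold prioritize_routes_alt
  have h0 : ((PySem.List.pyRange 0 (PySem.List.len ROUTE_PRIORITY_MARKERS + 1) 1).map
      (fun _ => ([] : List String))) = List.replicate 10 [] := by decide
  rw [h0]
  have hlen : ((PySem.List.sorted routes (fun r => r)).foldl
      (fun bs route => bs.modify (pvCls route).toNat (fun b => b ++ [route]))
      (List.replicate 10 [])).length = 10 := by
    rw [pv_fold_length]; simp
  have hres : ((PySem.List.sorted routes (fun r => r)).foldl
      (fun bs route => bs.modify (pvCls route).toNat (fun b => b ++ [route]))
      (List.replicate 10 [])) = (List.range 10).map (fun i =>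
        (PySem.List.sorted routes (fun r => r)).filter (fun r => (pvCls r).toNat == i)) := by
    apply List.ext_getElem
    · simp only [List.length_map, List.length_range]
      exact hlen
    · intro i h1 h2
      have hi : i < 10 := by rw [hlen] at h1; exact h1
      have hthis := pv_fold_getD (PySem.List.sorted routes (fun r => r)) (List.replicate 10 []) i
        (by simpa using hi)
      have hrep : (List.replicate 10 ([] : List String)).getD i [] = [] := by
        rw [List.getD_eq_getElem?_getD, List.getElem?_replicate]
        split <;> rfl
      rw [hrep, List.getD_eq_getElem?_getD, List.getElem?_eq_getElem h1, Option.getD_some,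
        List.nil_append] at hthis
      rw [hthis, List.getElem_map, List.getElem_range]
  rw [hres, List.flatMap_map]

-- Python's tuple key (int, str) is the lexicographic product order.
theorem sorted2_eq_sorted_lex {α : Type} (xs : List α) (k1 : α → Int) (k2 : α → String) :
    PySem.List.sorted2 xs k1 k2
      = PySem.List.sorted xs (fun x => (toLex (k1 x, k2 x) : Lex (Int × String))) := by
  have h : (fun a b : α => (decide (k1 a < k1 b) || (!decide (k1 b < k1 a) && decide (k2 a < k2 b))))
      = fun a b => decide ((toLex (k1 a, k2 a) : Lex (Int × String)) < toLex (k1 b, k2 b)) := by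
    funext a b
    by_cases h1 : k1 a < k1 b <;> by_cases h2 : k1 b < k1 a <;> by_cases h3 : k2 a < k2 b <;>
      simp [h1, h2, h3, Prod.Lex.lt_iff] <;> omega
  unfold PySem.List.sorted2 PySem.List.sorted
  simp only [Bool.false_eq_true, if_false, h]

-- Partitioning a list by the (unique) class of each element is a permutation of the list.
theorem pv_partition_perm (f : String → Nat) : ∀ (cs : List Nat), cs.Nodup →
    ∀ (rs : List String), (∀ r ∈ rs, f r ∈ cs) →
    (cs.flatMap (fun c => rs.filter (fun r => f r == c))).Perm rs := by
  intro cs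
  induction cs with
  | nil =>
      intro _ rs h
      cases rs with
      | nil => simp
      | cons r rs => exact absurd (h r (by simp)) (by simp)
  | cons c cs ih =>
      intro hnd rs h
      rw [List.nodup_cons] at hnd
      simp only [List.flatMap_cons]
      have hstep : ∀ c' ∈ cs, rs.filter (fun r => f r == c')
          = (rs.filter (fun r => !(f r == c))).filter (fun r => f r == c') := by
        intro c' hc'
        rw [List.filter_filter]
        apply List.filter_congr
        intro r _
        have hne : c' ≠ c := by rintro rfl; exact hnd.1 hc'
        by_cases hfc : f r = c'
        · simp [hfc, hne]
        · simp [hfc]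
      have hsub : ∀ r ∈ rs.filter (fun r => !(f r == c)), f r ∈ cs := by
        intro r hr
        have hr' := List.mem_filter.mp hr
        have hmem := h r hr'.1
        have hne : f r ≠ c := by simpa using hr'.2
        simp only [List.mem_cons] at hmem
        tauto
      have hperm := ih hnd.2 (rs.filter (fun r => !(f r == c))) hsub
      have hmid : (cs.flatMap (fun c' => rs.filter (fun r => f r == c'))).Perm
          (rs.filter (fun r => !(f r == c))) := by
        refine List.Perm.trans ?_ hperm
        exact List.Perm.of_eq (List.flatMap_congr hstep)
      exact ((List.Perm.append_left _ hmid).trans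
        (List.filter_append_perm (fun r => f r == c) rs))

theorem pv_mem_bucket {c : Nat} {x : String} {routes : List String}
    (hx : x ∈ (PySem.List.sorted routes (fun r => r)).filter (fun r => (pvCls r).toNat == c)) :
    pvCls x = (c : Int) := by
  have h := (List.mem_filter.mp hx).2
  have hb := pvCls_bounds x
  have : (pvCls x).toNat = c := by simpa using h
  omega

theorem pv_pairwise_out (routes : List String) :
    ((List.range 10).flatMap (fun i =>
        (PySem.List.sorted routes (fun r => r)).filter (fun r => (pvCls r).toNat == i))).Pairwise
      (fun a b => (toLex (pvCls a, a) : Lex (Int × String)) ≤ toLex (pvCls b, b)) := by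
  rw [List.pairwise_flatMap]
  constructor
  · intro c _
    have hpw : (PySem.List.sorted routes (fun r => r)).Pairwise (fun a b : String => a ≤ b) :=
      PySem.List.sorted_pairwise routes (fun r => r)
    refine List.Pairwise.imp_of_mem ?_ (hpw.filter _)
    intro a b ha hb hle
    rw [Prod.Lex.le_iff]
    right
    exact ⟨by simp [pv_mem_bucket ha, pv_mem_bucket hb], by simpa using hle⟩
  · refine (List.pairwise_lt_range).imp ?_
    intro c1 c2 hlt x hx y hy
    rw [Prod.Lex.le_iff]
    left
    simp only [ofLex_toLex]
    rw [pv_mem_bucket hx, pv_mem_bucket hy]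
    exact_mod_cast hlt

-- ===== VERDICT (by name: the statement is the Claim_ definition above) =====
theorem prioritize_routes_spec : Claim_equal_prioritize_routes := by
  intro routes _
  show prioritize_routes routes = prioritize_routes_alt routes
  have hA : prioritize_routes routes
      = PySem.List.sorted routes (fun r => (toLex (pvCls r, r) : Lex (Int × String))) := by
    unfold prioritize_routes
    have h1 : (fun r => (pvScore r).1) = pvCls := by
      funext r; rw [pvScore_eq]
    have h2 : (fun r => (pvScore r).2) = fun r : String => r := by
      funext r; rw [pvScore_eq]
    rw [h1, h2, sorted2_eq_sorted_lex]
  rw [hA, pv_alt_eq]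
  apply PySem.List.eq_of_perm_of_pairwise_le_of_injective
    (fun r => (toLex (pvCls r, r) : Lex (Int × String)))
  · intro a b hab
    have := congrArg (fun p : Lex (Int × String) => (ofLex p).2) hab
    simpa using this
  · have hsp := PySem.List.sorted_perm routes (fun r => r) false
    have hall : ∀ r ∈ PySem.List.sorted routes (fun r => r), (pvCls r).toNat ∈ List.range 10 := by
      intro r _
      have := pvCls_bounds r
      rw [List.mem_range]
      omega
    have hpart := pv_partition_perm (fun r => (pvCls r).toNat) (List.range 10)
      List.nodup_range _ hall
    exact (PySem.List.sorted_perm routes _ false).trans ((hpart.trans hsp).symm)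
  · exact PySem.List.sorted_pairwise routes _
  · exact pv_pairwise_out routes
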